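-- pv_equiv track=rewrite | github.com/hotbreakb/Cooking | programmers/whitehyun/프린터.py | solution
-- ===== SOURCE A (Python) =====
-- from collections import deque
--
-- def solution(priorities, location):
--     queue = deque(priorities)
--     top_priority = max(priorities)
--     wanted_paper = location
--     answer = 0
--     while True:
--         while queue[0] != top_priority:
--             queue.append(queue.popleft())
--             wanted_paper = wanted_paper - 1 if wanted_paper > 0 else len(queue) - 1
--         queue.popleft()
--         answer += 1
--         wanted_paper -= 1
--         if wanted_paper == -1:
--             break
--         top_priority = max(queue)
--     return answer
-- ===== SOURCE B (Python) =====
-- from collections import deque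
--
--
-- def solution(priorities, location):
--     queue = deque(enumerate(priorities))
--     answer = 0
--     while queue:
--         index, priority = queue.popleft()
--         if any(p > priority for _, p in queue):
--             queue.append((index, priority))
--         else:
--             answer += 1
--             if index == location:
--                 return answer
-- ===== Notes on version B (the rewrite author's own statement) =====
-- stated objective: simpler
-- what changed: B tags each document with its original index via enumerate and simulates the queue with a per-step scan of the remaining documents, removing A's precomputed-and-refreshed max and the arithmetic tracking of the target's position (wanted_paper).
-- outside the precondition, e.g. on solution([1, 2, 3], 5): A returns 3, B returns None; on solution([1, 2, 3], -1): A returns 3, B returns None; on solution([], 0): A raises ValueError, B returns None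
import Mathlib
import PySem

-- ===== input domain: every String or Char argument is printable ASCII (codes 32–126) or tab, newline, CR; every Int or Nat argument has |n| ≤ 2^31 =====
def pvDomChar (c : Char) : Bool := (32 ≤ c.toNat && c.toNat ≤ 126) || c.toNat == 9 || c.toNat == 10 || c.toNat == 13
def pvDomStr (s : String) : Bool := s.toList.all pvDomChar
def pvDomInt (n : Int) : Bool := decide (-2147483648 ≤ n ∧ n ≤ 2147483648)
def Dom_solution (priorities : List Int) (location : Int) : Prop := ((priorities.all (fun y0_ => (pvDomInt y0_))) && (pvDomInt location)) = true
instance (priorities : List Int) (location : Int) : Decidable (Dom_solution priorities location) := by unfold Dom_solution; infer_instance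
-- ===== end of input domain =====

-- B replaces A's precomputed/refreshed max and wanted_paper position arithmetic by an
-- enumerate-tagged queue with a per-step scan of the remaining elements (objective: simpler).
-- The Nat fuel parameters below are totality guards only (Python's loops have none); under
-- Pre_ the supplied fuel is never exhausted, which the equivalence proof establishes.

-- ===== PORT A =====
-- inner 'while queue[0] != top_priority' loop of A: rotate front to back, adjusting wanted_paper.
-- ([] case: Python raises IndexError on an empty deque; unreachable under Pre_.)
def rotateF : Nat → List Int → Int → Int → List Int × Int
  | 0, q, _, w => (q, w)
  | f + 1, q, top, w =>
    match q with
    | [] => ([], w)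
    | h :: t =>
      if h = top then (h :: t, w)
      else rotateF f (t ++ [h]) top (if w > 0 then w - 1 else ((t.length : Int) + 1) - 1)

-- outer 'while True' loop of A: rotate, pop, count, break when wanted_paper hits -1, refresh max.
def outerF : Nat → List Int → Int → Int → Int → Int
  | 0, _, _, _, ans => ans
  | f + 1, q, top, w, ans =>
    if (rotateF q.length q top w).1 = [] then ans   -- unreachable guard (Python raises on the popleft)
    else
      if (rotateF q.length q top w).2 - 1 = -1 then ans + 1
      else
        match PySem.List.max? (rotateF q.length q top w).1.tail (fun y => y) with
        | none => ans + 1            -- unreachable guard: Python's max(queue) raises on []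
        | some top' => outerF f (rotateF q.length q top w).1.tail top' ((rotateF q.length q top w).2 - 1) (ans + 1)

def solution (priorities : List Int) (location : Int) : Int :=
  match PySem.List.max? priorities (fun y => y) with
  | none => 0                      -- Python raises ValueError on an empty list (excluded by Pre_)
  | some top => outerF (priorities.length + 1) priorities top location 0

-- ===== PORT B =====
-- B's single loop: pop the front pair; if any remaining priority is greater, re-append it;
-- otherwise it prints (answer + 1) and we stop when its original index equals the target.
def bloopF : Nat → List (Int × Int) → Int → Int → Int
  | 0, _, ans, _ => ans
  | f + 1, q, ans, loc =>
    match q with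
    | [] => ans                    -- unreachable under Pre_ (Python B would return None)
    | (idx, pri) :: rest =>
      if rest.any (fun ip => pri < ip.2) then bloopF f (rest ++ [(idx, pri)]) ans loc
      else
        if idx = loc then ans + 1
        else bloopF f rest (ans + 1) loc

def solution_alt (priorities : List Int) (location : Int) : Int :=
  bloopF ((priorities.length + 1) * (priorities.length + 1)) (PySem.List.enumerate priorities) 0 location

-- ===== PRECONDITION & SPEC =====
-- Pre_ excludes: the empty list, on which A raises ValueError (max of empty sequence), and
-- out-of-range locations (no document has that index, so the task is meaningless there), on
-- which A's returned count is an accident of its wanted_paper arithmetic while B returns None.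
def Pre_solution (priorities : List Int) (location : Int) : Prop :=
  priorities ≠ [] ∧ 0 ≤ location ∧ location < (priorities.length : Int)
instance (priorities : List Int) (location : Int) : Decidable (Pre_solution priorities location) := by
  unfold Pre_solution; infer_instance

def pvWitness_solution : List Int × Int := ([2, 1, 3, 2], 2)

def Spec_solution (priorities : List Int) (location : Int) (out : Int) : Prop := out = solution_alt priorities location
instance (priorities : List Int) (location : Int) (out : Int) : Decidable (Spec_solution priorities location out) := by unfold Spec_solution; infer_instance

-- ===== CLAIM (what is proved, stated in full; the proofs are below) =====
def Claim_equal_solution : Prop := ∀ (priorities : List Int) (location : Int), Dom_solution priorities location → Pre_solution priorities location → Spec_solution priorities location (solution priorities location)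

-- ===== LEMMAS AND PROOFS =====

theorem pv_idxOf_append_left {l : List Int} {a : Int} (b : Int) (h : a ∈ l) :
    (l ++ [b]).idxOf a = l.idxOf a := by
  induction l with
  | nil => cases h
  | cons x xs ih =>
    by_cases hx : x = a
    · simp [hx]
    · have h' : a ∈ xs := by
        cases h with
        | head => exact absurd rfl hx
        | tail _ hh => exact hh
      simp [hx, ih h']

theorem pv_idxOf_cons_self (a : Int) (t : List Int) : (a :: t).idxOf a = 0 := by
  simp

theorem pv_idxOf_cons_ne (h a : Int) (t : List Int) (hne : h ≠ a) :
    (h :: t).idxOf a = t.idxOf a + 1 := by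
  simp [hne]

theorem pv_idxOf_lt_of_mem {a : Int} : ∀ {l : List Int}, a ∈ l → l.idxOf a < l.length := by
  intro l
  induction l with
  | nil => intro h; cases h
  | cons x xs ih =>
    intro h
    by_cases hx : x = a
    · rw [hx, pv_idxOf_cons_self]
      simp
    · have h' : a ∈ xs := by
        cases h with
        | head => exact absurd rfl hx
        | tail _ hh => exact hh
      rw [pv_idxOf_cons_ne x a xs hx]
      simpa using ih h'

-- the result of the rotation loop does not depend on the fuel, as long as it exceeds the
-- position of the first occurrence of top
theorem rotateF_fuel (top : Int) : ∀ (k f1 f2 : Nat) (l : List Int) (w : Int),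
    top ∈ l → l.idxOf top = k → k < f1 → k < f2 →
    rotateF f1 l top w = rotateF f2 l top w := by
  intro k
  induction k with
  | zero =>
    intro f1 f2 l w hmem hidx h1 h2
    cases l with
    | nil => cases hmem
    | cons h t =>
      have hh : h = top := by
        by_contra hne
        rw [pv_idxOf_cons_ne h top t hne] at hidx
        omega
      cases f1 with
      | zero => omega
      | succ f1 =>
        cases f2 with
        | zero => omega
        | succ f2 => simp only [rotateF, if_pos hh]
  | succ k ih =>
    intro f1 f2 l w hmem hidx h1 h2
    cases l with
    | nil => cases hmem
    | cons h t =>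
      have hne : h ≠ top := by
        intro he
        rw [he, pv_idxOf_cons_self] at hidx
        omega
      have hmt : top ∈ t := (List.mem_cons.1 hmem).resolve_left (Ne.symm hne)
      have hit : t.idxOf top = k := by
        rw [pv_idxOf_cons_ne h top t hne] at hidx
        omega
      cases f1 with
      | zero => omega
      | succ f1 =>
        cases f2 with
        | zero => omega
        | succ f2 =>
          simp only [rotateF, if_neg hne]
          exact ih f1 f2 (t ++ [h]) _ (List.mem_append_left _ hmt)
            (by rw [pv_idxOf_append_left h hmt]; exact hit) (by omega) (by omega)

-- outerF only looks at the result of the rotation loop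
theorem outerF_congr (f : Nat) {q q' : List Int} {top top' w w' : Int}
    (h : rotateF q.length q top w = rotateF q'.length q' top' w') (ans : Int) :
    outerF (f + 1) q top w ans = outerF (f + 1) q' top' w' ans := by
  simp only [outerF]
  rw [h]

-- the head is maximal iff nothing behind it is strictly greater
theorem head_eq_top (pri top : Int) (t : List Int)
    (hmem : top ∈ pri :: t) (hmax : ∀ y ∈ pri :: t, y ≤ top)
    (hno : ∀ y ∈ t, y ≤ pri) : pri = top := by
  apply le_antisymm (hmax pri (List.mem_cons_self))
  rcases List.mem_cons.1 hmem with h' | h'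
  · rw [h']
  · exact hno _ h'

-- fuel-budget arithmetic for the two loop steps
theorem fuel_rot (M k fb : Nat) (h : M + (k + 1) + 1 ≤ fb + 1) : M + k + 1 ≤ fb := by omega

theorem fuel_print (r k fb : Nat) (hk : k < r) (h : (r + 1) * (r + 1) + 0 + 1 ≤ fb + 1) :
    r * r + k + 1 ≤ fb := by
  have he : (r + 1) * (r + 1) = r * r + 2 * r + 1 := by ring
  rw [he] at h
  have h2 : r * r + k + 1 ≤ r * r + 2 * r := by omega
  omega

theorem fuel_top (n k : Nat) (hk : k < n) : n * n + k + 1 ≤ (n + 1) * (n + 1) := by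
  have he : (n + 1) * (n + 1) = n * n + 2 * n + 1 := by ring
  rw [he]
  omega

-- Invariant-carrying equivalence of the two loops: top is the maximum of the priorities,
-- w the position of the unique pair tagged loc, and both sides hold enough fuel.
theorem main_lemma (loc : Int) : ∀ (fb : Nat) (q : List (Int × Int)) (fo : Nat) (ans top w : Int),
    q ≠ [] →
    top ∈ q.map Prod.snd →
    (∀ y ∈ q.map Prod.snd, y ≤ top) →
    0 ≤ w → w < (q.length : Int) →
    (∀ (i : Nat) (h : i < q.length), ((q[i]'h).1 = loc ↔ (i : Int) = w)) →
    q.length < fo →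
    q.length * q.length + (q.map Prod.snd).idxOf top + 1 ≤ fb →
    outerF fo (q.map Prod.snd) top w ans = bloopF fb q ans loc := by
  intro fb
  induction fb with
  | zero =>
    intro q fo ans top w hne _ _ _ _ _ _ hfb
    have hq : 0 < q.length := List.length_pos_of_ne_nil hne
    have hm : 0 < q.length * q.length := Nat.mul_pos hq hq
    omega
  | succ fb ih =>
    intro q fo ans top w hne hmem hmax hw0 hwlen hloc hfo hfb
    cases q with
    | nil => exact absurd rfl hne
    | cons p rest =>
    obtain ⟨idx, pri⟩ := p
    cases fo with
    | zero => omega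
    | succ fo =>
    simp only [List.map_cons] at hmem hmax ⊢
    by_cases hany : rest.any (fun ip => pri < ip.2) = true
    · -- rotation step: some remaining priority is strictly greater
      have hany' := hany
      simp only [List.any_eq_true, decide_eq_true_eq] at hany'
      obtain ⟨x, hx, hpx⟩ := hany'
      have hx2 : x.2 ∈ rest.map Prod.snd := List.mem_map_of_mem hx
      have hpri_ne : pri ≠ top := by
        have : pri < top := lt_of_lt_of_le hpx (hmax _ (List.mem_cons_of_mem _ hx2))
        omega
      have htopmem : top ∈ rest.map Prod.snd := (List.mem_cons.1 hmem).resolve_left (Ne.symm hpri_ne)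
      have hidxlt : (rest.map Prod.snd).idxOf top < (rest.map Prod.snd).length :=
        pv_idxOf_lt_of_mem htopmem
      have hidxc : (pri :: rest.map Prod.snd).idxOf top = (rest.map Prod.snd).idxOf top + 1 :=
        pv_idxOf_cons_ne pri top _ hpri_ne
      have hidxa : (rest.map Prod.snd ++ [pri]).idxOf top = (rest.map Prod.snd).idxOf top :=
        pv_idxOf_append_left pri htopmem
      have hwlen' : w < (rest.length : Int) + 1 := by
        simp only [List.length_cons] at hwlen
        push_cast at hwlen ⊢
        omega
      have hlen2 : (rest ++ [(idx, pri)]).length = rest.length + 1 := by simp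
      have hblp : bloopF (fb + 1) ((idx, pri) :: rest) ans loc
          = bloopF fb (rest ++ [(idx, pri)]) ans loc := by
        simp only [bloopF]
        rw [if_pos hany]
      rw [hblp]
      have hmap2 : (rest ++ [(idx, pri)]).map Prod.snd = rest.map Prod.snd ++ [pri] := by simp
      have hfb2 : (rest ++ [(idx, pri)]).length * (rest ++ [(idx, pri)]).length
          + ((rest ++ [(idx, pri)]).map Prod.snd).idxOf top + 1 ≤ fb := by
        rw [hmap2, hidxa, hlen2]
        apply fuel_rot ((rest.length + 1) * (rest.length + 1)) _ fb
        simp only [List.length_cons, List.map_cons, hidxc] at hfb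
        omega
      by_cases hwgt : w > 0
      · have hstep : rotateF ((rest.map Prod.snd).length + 1) (pri :: rest.map Prod.snd) top w
            = rotateF (rest.map Prod.snd).length (rest.map Prod.snd ++ [pri]) top (w - 1) := by
          simp only [rotateF, if_neg hpri_ne, if_pos hwgt]
        have hlift : rotateF (rest.map Prod.snd).length (rest.map Prod.snd ++ [pri]) top (w - 1)
            = rotateF (rest.map Prod.snd ++ [pri]).length (rest.map Prod.snd ++ [pri]) top (w - 1) := by
          apply rotateF_fuel top ((rest.map Prod.snd).idxOf top) _ _ _ _
            (List.mem_append_left _ htopmem) hidxa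
          · omega
          · simp only [List.length_append, List.length_singleton]
            omega
        have hrot : rotateF (pri :: rest.map Prod.snd).length (pri :: rest.map Prod.snd) top w
            = rotateF (rest.map Prod.snd ++ [pri]).length (rest.map Prod.snd ++ [pri]) top (w - 1) := by
          rw [List.length_cons, hstep, hlift]
        rw [outerF_congr fo hrot ans, ← hmap2]
        apply ih
        · simp
        · rw [hmap2]; exact List.mem_append_left _ htopmem
        · rw [hmap2]
          intro y hy
          rcases List.mem_append.1 hy with h' | h'
          · exact hmax _ (List.mem_cons_of_mem _ h')
          · simp only [List.mem_singleton] at h'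
            rw [h']; exact hmax _ (List.mem_cons_self)
        · omega
        · rw [hlen2]; push_cast; omega
        · intro i hi
          simp only [List.length_append, List.length_cons, List.length_nil] at hi
          by_cases hir : i < rest.length
          · rw [List.getElem_append_left hir]
            have h1 := hloc (i + 1) (by simpa using hir)
            simp only [List.getElem_cons_succ] at h1
            rw [h1]
            push_cast
            omega
          · have hie : i = rest.length := by omega
            subst hie
            rw [List.getElem_append_right (by omega)]
            simp only [Nat.sub_self, List.getElem_cons_zero]
            have h0 := hloc 0 (by simp)
            simp only [List.getElem_cons_zero] at h0
            rw [h0]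
            push_cast
            omega
        · rw [hlen2]
          simp only [List.length_cons] at hfo
          omega
        · exact hfb2
      · have hw : w = 0 := by omega
        have harith : ((rest.map Prod.snd).length : Int) + 1 - 1 = (rest.length : Int) := by simp
        have hstep : rotateF ((rest.map Prod.snd).length + 1) (pri :: rest.map Prod.snd) top w
            = rotateF (rest.map Prod.snd).length (rest.map Prod.snd ++ [pri]) top (rest.length : Int) := by
          simp only [rotateF, if_neg hpri_ne, if_neg hwgt, harith]
        have hlift : rotateF (rest.map Prod.snd).length (rest.map Prod.snd ++ [pri]) top (rest.length : Int)
            = rotateF (rest.map Prod.snd ++ [pri]).length (rest.map Prod.snd ++ [pri]) top (rest.length : Int) := by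
          apply rotateF_fuel top ((rest.map Prod.snd).idxOf top) _ _ _ _
            (List.mem_append_left _ htopmem) hidxa
          · omega
          · simp only [List.length_append, List.length_singleton]
            omega
        have hrot : rotateF (pri :: rest.map Prod.snd).length (pri :: rest.map Prod.snd) top w
            = rotateF (rest.map Prod.snd ++ [pri]).length (rest.map Prod.snd ++ [pri]) top (rest.length : Int) := by
          rw [List.length_cons, hstep, hlift]
        rw [outerF_congr fo hrot ans, ← hmap2]
        apply ih
        · simp
        · rw [hmap2]; exact List.mem_append_left _ htopmem
        · rw [hmap2]
          intro y hy
          rcases List.mem_append.1 hy with h' | h'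
          · exact hmax _ (List.mem_cons_of_mem _ h')
          · simp only [List.mem_singleton] at h'
            rw [h']; exact hmax _ (List.mem_cons_self)
        · omega
        · rw [hlen2]; push_cast; omega
        · intro i hi
          simp only [List.length_append, List.length_cons, List.length_nil] at hi
          by_cases hir : i < rest.length
          · rw [List.getElem_append_left hir]
            have h1 := hloc (i + 1) (by simpa using hir)
            simp only [List.getElem_cons_succ] at h1
            rw [h1]
            push_cast
            omega
          · have hie : i = rest.length := by omega
            subst hie
            rw [List.getElem_append_right (by omega)]
            simp only [Nat.sub_self, List.getElem_cons_zero]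
            have h0 := hloc 0 (by simp)
            simp only [List.getElem_cons_zero] at h0
            rw [h0]
            push_cast
            simp only [iff_true]
            omega
        · rw [hlen2]
          simp only [List.length_cons] at hfo
          omega
        · exact hfb2
    · -- the head prints: it is maximal
      have hno : ∀ y ∈ rest.map Prod.snd, y ≤ pri := by
        intro y hy
        obtain ⟨p, hp, hpy⟩ := List.mem_map.1 hy
        by_contra hlt
        exact hany (List.any_eq_true.2 ⟨p, hp, by simp only [decide_eq_true_eq]; omega⟩)
      have htop : pri = top := head_eq_top pri top _ hmem hmax hno
      have hrot : rotateF ((rest.map Prod.snd).length + 1) (pri :: rest.map Prod.snd) top w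
          = (pri :: rest.map Prod.snd, w) := by
        simp only [rotateF, if_pos htop]
      by_cases hil : idx = loc
      · -- the printed document is the target: w = 0, both sides return ans + 1
        have hw : w = 0 := by
          have h0 := hloc 0 (by simp)
          simp only [List.getElem_cons_zero] at h0
          have := h0.1 hil
          omega
        simp only [outerF, List.length_cons]
        rw [hrot]
        rw [if_neg (by simp : ¬ ((pri :: rest.map Prod.snd, w).1 = []))]
        rw [if_pos (by omega : (pri :: rest.map Prod.snd, w).2 - 1 = -1)]
        simp only [bloopF]
        rw [if_neg hany, if_pos hil]
      · -- a non-target document prints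
        have hwpos : 0 < w := by
          have h0 := hloc 0 (by simp)
          simp only [List.getElem_cons_zero] at h0
          have hne0 : ¬ ((0 : Int) = w) := fun h' => hil (h0.2 h')
          omega
        have hwlen' : w < (rest.length : Int) + 1 := by
          simp only [List.length_cons] at hwlen
          push_cast at hwlen ⊢
          omega
        have hrne : rest ≠ [] := by
          intro h'
          subst h'
          simp only [List.length_nil, Nat.cast_zero] at hwlen'
          omega
        have hrne' : rest.map Prod.snd ≠ [] := by simpa using hrne
        cases hm' : PySem.List.max? (rest.map Prod.snd) (fun y => y) with
        | none => exact absurd ((PySem.List.max?_eq_none_iff _ _).1 hm') hrne'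
        | some top' =>
          simp only [outerF, List.length_cons]
          rw [hrot]
          rw [if_neg (by simp : ¬ ((pri :: rest.map Prod.snd, w).1 = []))]
          rw [if_neg (by omega : ¬ ((pri :: rest.map Prod.snd, w).2 - 1 = -1))]
          simp only [List.tail_cons]
          rw [hm']
          have hblp : bloopF (fb + 1) ((idx, pri) :: rest) ans loc
              = bloopF fb rest (ans + 1) loc := by
            simp only [bloopF]
            rw [if_neg hany, if_neg hil]
          rw [hblp]
          apply ih
          · exact hrne
          · exact PySem.List.max?_mem hm'
          · exact PySem.List.max?_isMax hm'
          · omega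
          · omega
          · intro i hi
            have h1 := hloc (i + 1) (by simpa using hi)
            simp only [List.getElem_cons_succ] at h1
            rw [h1]
            push_cast
            omega
          · simp only [List.length_cons] at hfo
            omega
          · have hidx0 : (pri :: rest.map Prod.snd).idxOf top = 0 := by
              rw [← htop]
              exact pv_idxOf_cons_self pri _
            have hklt : (rest.map Prod.snd).idxOf top' < rest.length := by
              have := pv_idxOf_lt_of_mem (PySem.List.max?_mem hm')
              simpa using this
            apply fuel_print rest.length _ fb hklt
            simp only [List.length_cons, List.map_cons, hidx0] at hfb
            omega

-- ===== VERDICT (by name: the statement is the Claim_ definition above) =====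
theorem solution_spec : Claim_equal_solution := by
  intro priorities location _ hpre
  obtain ⟨hne, h0, hlen⟩ := hpre
  unfold Spec_solution solution solution_alt
  cases hmax : PySem.List.max? priorities (fun y => y) with
  | none => exact absurd ((PySem.List.max?_eq_none_iff _ _).1 hmax) hne
  | some top =>
    have hq : (PySem.List.enumerate priorities).map Prod.snd = priorities :=
      PySem.List.map_snd_enumerate priorities 0
    have hlen' : (PySem.List.enumerate priorities).length = priorities.length :=
      PySem.List.length_enumerate priorities 0
    rw [← main_lemma location ((priorities.length + 1) * (priorities.length + 1))
      (PySem.List.enumerate priorities) (priorities.length + 1) 0 top location]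
    · rw [hq]
    · intro h
      rw [h] at hlen'
      exact hne (List.eq_nil_of_length_eq_zero hlen'.symm)
    · rw [hq]; exact PySem.List.max?_mem hmax
    · rw [hq]; exact PySem.List.max?_isMax hmax
    · exact h0
    · rw [hlen']; exact hlen
    · intro i hi
      rw [PySem.List.getElem_enumerate]
      push_cast
      omega
    · rw [hlen']
      omega
    · rw [hq, hlen']
      exact fuel_top priorities.length _ (pv_idxOf_lt_of_mem (PySem.List.max?_mem hmax))
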